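-- pv_equiv track=rewrite | github.com/wawzysys/Algorithm | bishi/1_2024秋招/20250811拼多多/3.py | solve
-- ===== SOURCE A (Python) =====
-- def solve(n, flowers):
--     a = [0] * (n + 1)
--     s = [0] * (n + 1)
--     for i in range(1, n + 1):
--         a[i] = 1 if flowers[i - 1] == 1 else -1
--         s[i] = s[i - 1] + a[i]
--     v = 0
--     vv = 0
--     kk = 0
--     k = 0
--     for i in range(1, n + 1):
--         kk = max(kk, s[i] - v)
--         v = min(v, s[i])
--         k = min(k, s[i] - vv)
--         vv = max(vv, s[i])
--     y = s[n] - k * 2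
--     x = s[n] - kk * 2
--     res = 0
--
--     if x >= 0:
--         res = (x - y) // 2 + 1
--     elif y <= 0:
--         res = (x - y) // 2 + 1
--     else:
--         z = max(abs(x), abs(y))
--         if y % 2 == 1:
--             res = (z + 1) // 2
--         else:
--             res = z // 2 + 1
--     return res
-- ===== SOURCE B (Python) =====
-- def solve(n, flowers):
--     total = 0
--     cur_max = 0
--     best_max = 0
--     cur_min = 0
--     best_min = 0
--     for f in flowers[:n]:
--         d = 1 if f == 1 else -1
--         total += d
--         cur_max = max(0, cur_max + d)
--         best_max = max(best_max, cur_max)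
--         cur_min = min(0, cur_min + d)
--         best_min = min(best_min, cur_min)
--     x = total - 2 * best_max
--     y = total - 2 * best_min
--     if x >= 0 or y <= 0:
--         return (x - y) // 2 + 1
--     z = max(abs(x), abs(y))
--     if y % 2 == 1:
--         return (z + 1) // 2
--     return z // 2 + 1
-- ===== Notes on version B (the rewrite author's own statement) =====
-- stated objective: simpler
-- what changed: B replaces A's two passes over auxiliary a/s prefix-sum arrays (running global prefix min/max) by a single array-free Kadane pass keeping reset-based current and best max/min subarray sums; the final branch arithmetic is unchanged.
import Mathlib
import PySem

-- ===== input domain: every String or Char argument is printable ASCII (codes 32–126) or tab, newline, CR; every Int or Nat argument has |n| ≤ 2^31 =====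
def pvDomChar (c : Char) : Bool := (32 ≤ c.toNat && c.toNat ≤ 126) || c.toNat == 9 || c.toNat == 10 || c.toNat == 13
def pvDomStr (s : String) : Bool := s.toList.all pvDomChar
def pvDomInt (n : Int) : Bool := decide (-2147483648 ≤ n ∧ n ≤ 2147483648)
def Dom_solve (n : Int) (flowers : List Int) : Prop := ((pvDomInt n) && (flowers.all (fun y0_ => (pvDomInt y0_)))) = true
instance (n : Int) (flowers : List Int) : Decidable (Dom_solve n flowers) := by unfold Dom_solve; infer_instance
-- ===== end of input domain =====

-- B replaces A's prefix-sum arrays + running-extremum pass by a single array-free Kadane pass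
-- (reset-based current max/min subarray sums); the final branch block is unchanged.

-- ===== PORT A =====
-- body of A's first for-loop (builds the a and s arrays)
def solveLoop1 (flowers : List Int) (st : List Int × List Int) (i : Int) : List Int × List Int :=
  let ai : Int := if PySem.List.pyGetD flowers (i - 1) 0 = 1 then 1 else -1
  let a := PySem.List.pySetD st.1 i ai
  let s := PySem.List.pySetD st.2 i (PySem.List.pyGetD st.2 (i - 1) 0 + PySem.List.pyGetD a i 0)
  (a, s)

-- body of A's second for-loop; state (v, vv, kk, k), updated in A's statement order
def solveLoop2 (s : List Int) (st : Int × Int × Int × Int) (i : Int) : Int × Int × Int × Int :=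
  let kk := max st.2.2.1 (PySem.List.pyGetD s i 0 - st.1)
  let v := min st.1 (PySem.List.pyGetD s i 0)
  let k := min st.2.2.2 (PySem.List.pyGetD s i 0 - st.2.1)
  let vv := max st.2.1 (PySem.List.pyGetD s i 0)
  (v, vv, kk, k)

def solve (n : Int) (flowers : List Int) : Int :=
  let a0 : List Int := PySem.List.pyRepeat [0] (n + 1)
  let s0 : List Int := PySem.List.pyRepeat [0] (n + 1)
  let as := (PySem.List.pyRange 1 (n + 1) 1).foldl (solveLoop1 flowers) (a0, s0)
  let s := as.2
  let st := (PySem.List.pyRange 1 (n + 1) 1).foldl (solveLoop2 s) (0, 0, 0, 0)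
  let y := PySem.List.pyGetD s n 0 - st.2.2.2 * 2
  let x := PySem.List.pyGetD s n 0 - st.2.2.1 * 2
  if x ≥ 0 then PySem.Int.floordiv (x - y) 2 + 1
  else if y ≤ 0 then PySem.Int.floordiv (x - y) 2 + 1
  else
    let z := max |x| |y|
    if PySem.Int.mod y 2 = 1 then PySem.Int.floordiv (z + 1) 2
    else PySem.Int.floordiv z 2 + 1

-- ===== PORT B =====
-- body of B's single Kadane loop; state (total, cur_max, best_max, cur_min, best_min)
def solveKadane (st : Int × Int × Int × Int × Int) (f : Int) : Int × Int × Int × Int × Int :=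
  let d : Int := if f = 1 then 1 else -1
  let total := st.1 + d
  let curMax := max 0 (st.2.1 + d)
  let bestMax := max st.2.2.1 curMax
  let curMin := min 0 (st.2.2.2.1 + d)
  let bestMin := min st.2.2.2.2 curMin
  (total, curMax, bestMax, curMin, bestMin)

def solve_alt (n : Int) (flowers : List Int) : Int :=
  let st := (PySem.List.slice flowers none (some n)).foldl solveKadane (0, 0, 0, 0, 0)
  let x := st.1 - 2 * st.2.2.1
  let y := st.1 - 2 * st.2.2.2.2
  if x ≥ 0 ∨ y ≤ 0 then PySem.Int.floordiv (x - y) 2 + 1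
  else
    let z := max |x| |y|
    if PySem.Int.mod y 2 = 1 then PySem.Int.floordiv (z + 1) 2
    else PySem.Int.floordiv z 2 + 1

-- ===== PRECONDITION & SPEC =====
-- A indexes flowers[i-1] for i in range(1, n+1) and s[n]: it raises IndexError when n < 0
-- or n > len(flowers); Pre_ admits exactly the inputs where A returns.
def Pre_solve (n : Int) (flowers : List Int) : Prop := 0 ≤ n ∧ n ≤ (flowers.length : Int)
instance (n : Int) (flowers : List Int) : Decidable (Pre_solve n flowers) := by unfold Pre_solve; infer_instance
def pvWitness_solve : Int × List Int := (3, [1, 0, 1])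

def Spec_solve (n : Int) (flowers : List Int) (out : Int) : Prop := out = solve_alt n flowers
instance (n : Int) (flowers : List Int) (out : Int) : Decidable (Spec_solve n flowers out) := by unfold Spec_solve; infer_instance

-- ===== CLAIM (what is proved, stated in full; the proofs are below) =====
def Claim_equal_solve : Prop := ∀ (n : Int) (flowers : List Int), Dom_solve n flowers → Pre_solve n flowers → Spec_solve n flowers (solve n flowers)
-- ===== LEMMAS AND PROOFS =====

-- d value of one flower
def dstep (f : Int) : Int := if f = 1 then 1 else -1

-- prefix sum of d over the first i flowers (= A's s[i])
def pref (flowers : List Int) (i : Nat) : Int := ((flowers.take i).map dstep).sum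

-- the s array after A's first loop with bound m
def psList (flowers : List Int) (m : Nat) : List Int := (List.range (m + 1)).map (pref flowers)

-- A's second loop, re-expressed as a direct fold over the flowers carrying the running
-- prefix sum; state (sum, v, vv, kk, k)
def stepA (st : Int × Int × Int × Int × Int) (f : Int) : Int × Int × Int × Int × Int :=
  let s' := st.1 + dstep f
  (s', min st.2.1 s', max st.2.2.1 s', max st.2.2.2.1 (s' - st.2.1), min st.2.2.2.2 (s' - st.2.2.1))

lemma pref_zero (flowers : List Int) : pref flowers 0 = 0 := rfl

lemma pref_succ (flowers : List Int) (m : Nat) (h : m < flowers.length) :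
    pref flowers (m + 1) = pref flowers m + dstep (flowers.getD m 0) := by
  unfold pref
  rw [List.map_take, List.map_take, List.sum_take_succ _ _ (by simpa using h)]
  simp [List.getD_eq_getElem?_getD, List.getElem?_eq_getElem h]

lemma psList_succ (flowers : List Int) (m : Nat) :
    psList flowers (m + 1) = psList flowers m ++ [pref flowers (m + 1)] := by
  unfold psList
  rw [List.range_succ, List.map_append]
  rfl

lemma set_append_len {α : Type} (l l' : List α) (v : α) :
    (l ++ l').set l.length v = l ++ l'.set 0 v := by
  induction l with
  | nil => simp
  | cons x t ih => simp [ih]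

lemma firstLoop (flowers : List Int) (M : Nat) (hM : M ≤ flowers.length) :
    ∀ m : Nat, m ≤ M →
      ((PySem.List.pyRange 1 ((m : Int) + 1) 1).foldl (solveLoop1 flowers)
        (List.replicate (M + 1) (0 : Int), List.replicate (M + 1) (0 : Int))).1.length = M + 1 ∧
      ((PySem.List.pyRange 1 ((m : Int) + 1) 1).foldl (solveLoop1 flowers)
        (List.replicate (M + 1) (0 : Int), List.replicate (M + 1) (0 : Int))).2
        = psList flowers m ++ List.replicate (M - m) 0 := by
  intro m
  induction m with
  | zero =>
    intro _
    rw [show ((0 : Nat) : Int) + 1 = 1 by norm_num, PySem.List.pyRange_one_eq_nil le_rfl]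
    refine ⟨by simp, ?_⟩
    simp only [List.foldl_nil, Nat.sub_zero, psList]
    rw [List.replicate_succ]
    simp [pref_zero]
  | succ m ih =>
    intro hm1
    have hm : m ≤ M := by omega
    obtain ⟨ihl, ihs⟩ := ih hm
    have hrange : PySem.List.pyRange 1 (((m + 1 : Nat) : Int) + 1) 1
        = PySem.List.pyRange 1 ((m : Int) + 1) 1 ++ [((m + 1 : Nat) : Int)] := by
      push_cast
      rw [PySem.List.pyRange_one_succ_right (by omega)]
    rw [hrange, List.foldl_append]
    set R := (PySem.List.pyRange 1 ((m : Int) + 1) 1).foldl (solveLoop1 flowers)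
        (List.replicate (M + 1) (0 : Int), List.replicate (M + 1) (0 : Int)) with hR
    simp only [List.foldl_cons, List.foldl_nil]
    unfold solveLoop1
    have hidx : ((m + 1 : Nat) : Int) - 1 = ((m : Nat) : Int) := by push_cast; ring
    rw [hidx]
    have hflen : m < flowers.length := by omega
    have hget_a : PySem.List.pyGetD (PySem.List.pySetD R.1 ((m + 1 : Nat) : Int)
        (if PySem.List.pyGetD flowers ((m : Nat) : Int) 0 = 1 then 1 else -1)) ((m + 1 : Nat) : Int) 0
        = (if PySem.List.pyGetD flowers ((m : Nat) : Int) 0 = 1 then (1 : Int) else -1) := by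
      rw [PySem.List.pyGetD_pySetD_natCast _ _ _ _ _ (by rw [ihl]; omega)]
      simp
    refine ⟨?_, ?_⟩
    · simp [ihl]
    · simp only [hget_a]
      rw [PySem.List.pySetD_natCast, ihs]
      have hfm : PySem.List.pyGetD flowers ((m : Nat) : Int) 0 = flowers.getD m 0 :=
        PySem.List.pyGetD_natCast ..
      have hsget : PySem.List.pyGetD (psList flowers m ++ List.replicate (M - m) (0:Int)) ((m : Nat) : Int) 0
          = pref flowers m := by
        rw [PySem.List.pyGetD_natCast]
        rw [List.getD_append _ _ _ _ (by simp [psList])]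
        simp [psList]
      rw [hsget, hfm]
      have hV : pref flowers m + (if flowers.getD m 0 = 1 then (1:Int) else -1)
          = pref flowers (m + 1) := by
        rw [pref_succ flowers m hflen]; rfl
      rw [hV]
      have hlen_ps : (psList flowers m).length = m + 1 := by simp [psList]
      rw [show M - m = (M - (m + 1)) + 1 by omega, List.replicate_succ, psList_succ]
      rw [show m + 1 = (psList flowers m).length from hlen_ps.symm, set_append_len]
      simp

lemma secondLoop (flowers : List Int) (M : Nat) (hM : M ≤ flowers.length) :
    ∀ m : Nat, m ≤ M →
      (flowers.take m).foldl stepA (0, 0, 0, 0, 0)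
        = (pref flowers m,
           ((PySem.List.pyRange 1 ((m : Int) + 1) 1).foldl (solveLoop2 (psList flowers M)) (0, 0, 0, 0))) := by
  intro m
  induction m with
  | zero =>
    intro _
    rw [show ((0 : Nat) : Int) + 1 = 1 by norm_num, PySem.List.pyRange_one_eq_nil le_rfl]
    simp only [List.take_zero, List.foldl_nil]
    rfl
  | succ m ih =>
    intro hm1
    have hm : m ≤ M := by omega
    have hflen : m < flowers.length := by omega
    have hrange : PySem.List.pyRange 1 (((m + 1 : Nat) : Int) + 1) 1
        = PySem.List.pyRange 1 ((m : Int) + 1) 1 ++ [((m + 1 : Nat) : Int)] := by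
      push_cast
      rw [PySem.List.pyRange_one_succ_right (by omega)]
    rw [hrange, List.take_add_one, List.getElem?_eq_getElem hflen, List.foldl_append,
      List.foldl_append, ih hm]
    simp only [Option.toList_some, List.foldl_cons, List.foldl_nil]
    have hg : PySem.List.pyGetD (psList flowers M) ((m + 1 : Nat) : Int) 0 = pref flowers (m + 1) := by
      rw [PySem.List.pyGetD_natCast]
      exact PySem.List.getD_map_range _ _ _ _ (by omega)
    unfold stepA solveLoop2
    rw [hg]
    have hs' : pref flowers m + dstep flowers[m] = pref flowers (m + 1) := by
      rw [pref_succ flowers m hflen, List.getD_eq_getElem _ _ hflen]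
    simp only [hs']

lemma kadane (fs : List Int) : ∀ (total cm bm cn bn : Int), 0 ≤ cm → 0 ≤ bm → cn ≤ 0 → bn ≤ 0 →
    fs.foldl stepA (total, total - cm, total - cn, bm, bn)
      = ((fs.foldl solveKadane (total, cm, bm, cn, bn)).1,
         (fs.foldl solveKadane (total, cm, bm, cn, bn)).1 - (fs.foldl solveKadane (total, cm, bm, cn, bn)).2.1,
         (fs.foldl solveKadane (total, cm, bm, cn, bn)).1 - (fs.foldl solveKadane (total, cm, bm, cn, bn)).2.2.2.1,
         (fs.foldl solveKadane (total, cm, bm, cn, bn)).2.2.1,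
         (fs.foldl solveKadane (total, cm, bm, cn, bn)).2.2.2.2) := by
  induction fs with
  | nil => intro total cm bm cn bn h1 h2 h3 h4; simp
  | cons f t ih =>
    intro total cm bm cn bn h1 h2 h3 h4
    simp only [List.foldl_cons]
    have hstep : stepA (total, total - cm, total - cn, bm, bn) f
        = (total + dstep f, (total + dstep f) - max 0 (cm + dstep f),
           (total + dstep f) - min 0 (cn + dstep f),
           max bm (max 0 (cm + dstep f)), min bn (min 0 (cn + dstep f))) := by
      simp only [stepA, Prod.mk.injEq]
      generalize dstep f = d
      refine ⟨trivial, by omega, by omega, by omega, by omega⟩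
    have hk : solveKadane (total, cm, bm, cn, bn) f
        = (total + dstep f, max 0 (cm + dstep f), max bm (max 0 (cm + dstep f)),
           min 0 (cn + dstep f), min bn (min 0 (cn + dstep f))) := rfl
    rw [hstep, hk]
    exact ih _ _ _ _ _ (le_max_left _ _) (le_trans h2 (le_max_left _ _)) (min_le_left _ _) (le_trans (min_le_left _ _) h4)

-- ===== VERDICT (by name: the statement is the Claim_ definition above) =====
theorem solve_spec : Claim_equal_solve := by
  intro n flowers _ hpre
  obtain ⟨hn0, hnlen⟩ := hpre
  obtain ⟨M, rfl⟩ : ∃ M : Nat, n = (M : Int) := ⟨n.toNat, by omega⟩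
  have hM : M ≤ flowers.length := by exact_mod_cast hnlen
  unfold Spec_solve
  simp only [solve, solve_alt]
  rw [PySem.List.pyRepeat_singleton, show ((M : Int) + 1).toNat = M + 1 by omega]
  obtain ⟨-, hs⟩ := firstLoop flowers M hM M le_rfl
  rw [hs]
  simp only [Nat.sub_self, List.replicate_zero, List.append_nil]
  have h2 := secondLoop flowers M hM M le_rfl
  have hk := kadane (flowers.take M) 0 0 0 0 0 le_rfl le_rfl le_rfl le_rfl
  norm_num at hk
  rw [hk] at h2
  have h2' : (PySem.List.pyRange 1 ((M : Int) + 1) 1).foldl (solveLoop2 (psList flowers M)) (0, 0, 0, 0)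
      = (((flowers.take M).foldl solveKadane (0, 0, 0, 0, 0)).1 -
           ((flowers.take M).foldl solveKadane (0, 0, 0, 0, 0)).2.1,
         ((flowers.take M).foldl solveKadane (0, 0, 0, 0, 0)).1 -
           ((flowers.take M).foldl solveKadane (0, 0, 0, 0, 0)).2.2.2.1,
         ((flowers.take M).foldl solveKadane (0, 0, 0, 0, 0)).2.2.1,
         ((flowers.take M).foldl solveKadane (0, 0, 0, 0, 0)).2.2.2.2) := by
    have := congrArg Prod.snd h2
    simpa using this.symm
  have hpref : pref flowers M = ((flowers.take M).foldl solveKadane (0, 0, 0, 0, 0)).1 := by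
    have := congrArg Prod.fst h2
    simpa using this.symm
  have hsn : PySem.List.pyGetD (psList flowers M) ((M : Int)) 0 = pref flowers M := by
    rw [PySem.List.pyGetD_natCast]
    exact PySem.List.getD_map_range _ _ _ _ (by omega)
  rw [h2', PySem.List.slice_to_natCast, hsn, hpref]
  set KB := (flowers.take M).foldl solveKadane (0, 0, 0, 0, 0) with hKB
  simp only []
  have hx : KB.1 - KB.2.2.1 * 2 = KB.1 - 2 * KB.2.2.1 := by ring
  have hy : KB.1 - KB.2.2.2.2 * 2 = KB.1 - 2 * KB.2.2.2.2 := by ring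
  rw [hx, hy]
  split_ifs <;> tauto
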